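-- pv_equiv track=rewrite | github.com/EKS2003/SSL_ParkinsonsDisease_Fork | backend/routes/utils_dtw.py | normalize_test_name
-- ===== SOURCE A (Python) =====
-- _TEST_NORMALIZATION_ALIASES = {
--     "stand-and-sit": "stand-and-sit",
--     "stand-sit": "stand-and-sit",
--     "stand_to_sit": "stand-and-sit",
--     "stand-and-sit-assessment": "stand-and-sit",
--     "stand-and-sit-test": "stand-and-sit",
--     "stand-&-sit": "stand-and-sit",
--     "stand-&-sit-assessment": "stand-and-sit",
--     "stand-and-sit-evaluation": "stand-and-sit",
--     "finger-tapping": "finger-tapping",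
--     "finger_tapping": "finger-tapping",
--     "finger-taping": "finger-tapping",
--     "finger-tapping-test": "finger-tapping",
--     "finger-tapping-assessment": "finger-tapping",
--     "finger-tap": "finger-tapping",
--     "fist-open-close": "fist-open-close",
--     "fist_open_close": "fist-open-close",
--     "fist-open-close-test": "fist-open-close",
--     "fist-open-close-assessment": "fist-open-close",
-- }
--
-- def normalize_test_name(t: str | None) -> str:
--     t = (t or "").strip().lower()
--     if not t:
--         return ""
--     t = t.replace(" ", "-").replace("_", "-")
--     t = t.replace("&", "and")
--     while "--" in t:
--         t = t.replace("--", "-")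
--     return _TEST_NORMALIZATION_ALIASES.get(t, t)
-- ===== SOURCE B (Python) =====
-- _TEST_NORMALIZATION_ALIASES = {
--     "stand-and-sit": "stand-and-sit",
--     "stand-sit": "stand-and-sit",
--     "stand_to_sit": "stand-and-sit",
--     "stand-and-sit-assessment": "stand-and-sit",
--     "stand-and-sit-test": "stand-and-sit",
--     "stand-&-sit": "stand-and-sit",
--     "stand-&-sit-assessment": "stand-and-sit",
--     "stand-and-sit-evaluation": "stand-and-sit",
--     "finger-tapping": "finger-tapping",
--     "finger_tapping": "finger-tapping",
--     "finger-taping": "finger-tapping",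
--     "finger-tapping-test": "finger-tapping",
--     "finger-tapping-assessment": "finger-tapping",
--     "finger-tap": "finger-tapping",
--     "fist-open-close": "fist-open-close",
--     "fist_open_close": "fist-open-close",
--     "fist-open-close-test": "fist-open-close",
--     "fist-open-close-assessment": "fist-open-close",
-- }
--
-- def normalize_test_name(t: str | None) -> str:
--     # Single pass: collapse space/underscore/hyphen runs to one '-' and expand '&' to 'and'.
--     t = (t or "").strip().lower()
--     if not t:
--         return ""
--     out = []
--     prev_hyphen = False
--     for ch in t:
--         if ch in " _-":
--             if not prev_hyphen:
--                 out.append("-")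
--                 prev_hyphen = True
--         elif ch == "&":
--             out.append("and")
--             prev_hyphen = False
--         else:
--             out.append(ch)
--             prev_hyphen = False
--     t = "".join(out)
--     return _TEST_NORMALIZATION_ALIASES.get(t, t)
-- ===== Notes on version B (the rewrite author's own statement) =====
-- stated objective: alternative
-- what changed: Replaced the chain of str.replace passes plus the re-scanning double-hyphen collapse loop by one left-to-right pass over the characters that emits a single hyphen for each run of spaces/underscores/hyphens (tracking whether the last emitted character was a hyphen), expands each ampersand to the word and, and copies other characters, before the same alias lookup.
import Mathlib
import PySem

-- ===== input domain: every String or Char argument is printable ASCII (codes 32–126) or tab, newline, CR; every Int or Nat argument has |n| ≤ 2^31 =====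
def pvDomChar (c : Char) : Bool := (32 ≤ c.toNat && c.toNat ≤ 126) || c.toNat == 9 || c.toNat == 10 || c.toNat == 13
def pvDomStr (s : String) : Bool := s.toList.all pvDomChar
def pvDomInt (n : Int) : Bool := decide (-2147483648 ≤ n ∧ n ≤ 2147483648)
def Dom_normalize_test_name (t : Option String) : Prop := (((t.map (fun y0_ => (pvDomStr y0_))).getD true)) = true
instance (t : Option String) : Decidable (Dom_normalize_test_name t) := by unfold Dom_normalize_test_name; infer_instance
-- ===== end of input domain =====

-- B replaces A's chain of str.replace passes and the re-scanning collapse loop by one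
-- left-to-right pass with a last-emitted-was-hyphen flag (same return value; no speed claim).

-- ===== PORT A =====
-- the module-level alias dict, in insertion order
def pvAliases : PySem.Dict String String := PySem.Dict.ofList [
  ("stand-and-sit", "stand-and-sit"),
  ("stand-sit", "stand-and-sit"),
  ("stand_to_sit", "stand-and-sit"),
  ("stand-and-sit-assessment", "stand-and-sit"),
  ("stand-and-sit-test", "stand-and-sit"),
  ("stand-&-sit", "stand-and-sit"),
  ("stand-&-sit-assessment", "stand-and-sit"),
  ("stand-and-sit-evaluation", "stand-and-sit"),
  ("finger-tapping", "finger-tapping"),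
  ("finger_tapping", "finger-tapping"),
  ("finger-taping", "finger-tapping"),
  ("finger-tapping-test", "finger-tapping"),
  ("finger-tapping-assessment", "finger-tapping"),
  ("finger-tap", "finger-tapping"),
  ("fist-open-close", "fist-open-close"),
  ("fist_open_close", "fist-open-close"),
  ("fist-open-close-test", "fist-open-close"),
  ("fist-open-close-assessment", "fist-open-close")]

-- what one pass of t.replace("--", "-") computes (proved equal to PySem.Chars.replace below;
-- used only to state the termination lemma for the while-loop port)
def rep2 : List Char → List Char
  | '-' :: '-' :: t => '-' :: rep2 t
  | c :: t => c :: rep2 t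
  | [] => []

-- adjacent-hyphen test, structural form of '"--" in t'
def hasDD : List Char → Bool
  | [] => false
  | c :: t => (c = '-' && t.head? = some '-') || hasDD t

theorem rep2_cons_cons (c1 c2 : Char) (t : List Char) (h : ¬(c1 = '-' ∧ c2 = '-')) :
    rep2 (c1 :: c2 :: t) = c1 :: rep2 (c2 :: t) := by
  rw [rep2.eq_def]
  split
  · rename_i t' heq; simp only [List.cons.injEq] at heq; exact absurd ⟨heq.1, heq.2.1⟩ h
  · rename_i x c t' hno heq; simp only [List.cons.injEq] at heq; obtain ⟨rfl, rfl⟩ := heq; rfl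
  · rename_i heq; simp at heq

theorem go_dd (fuel : Nat) (s acc : List Char) (h : s.length ≤ fuel) :
    PySem.Chars.replace.go ['-','-'] ['-'] fuel s acc = acc.reverse ++ rep2 s := by
  induction fuel generalizing s acc with
  | zero =>
    have : s = [] := List.length_eq_zero_iff.mp (Nat.le_zero.mp h)
    subst this; simp [PySem.Chars.replace.go, rep2]
  | succ n ih =>
    match s, h with
    | [], _ => simp [PySem.Chars.replace.go, rep2]
    | [c], _ =>
      rw [PySem.Chars.replace.go]
      have hp : List.isPrefixOf ['-','-'] [c] = false := by simp [List.isPrefixOf]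
      simp only [hp, Bool.false_eq_true, if_neg, not_false_iff]
      rw [ih _ _ (by simp)]
      have : rep2 [c] = [c] := by
        by_cases hc : c = '-' <;> simp [hc, rep2]
      simp [this, rep2]
    | c1 :: c2 :: t, h =>
      rw [PySem.Chars.replace.go]
      by_cases hdd : c1 = '-' ∧ c2 = '-'
      · obtain ⟨rfl, rfl⟩ := hdd
        have hp : List.isPrefixOf ['-','-'] ('-' :: '-' :: t) = true := by simp [List.isPrefixOf]
        simp only [hp, if_pos]
        rw [show List.drop (['-','-'] : List Char).length ('-' :: '-' :: t) = t from rfl]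
        rw [ih _ _ (by simp at h; omega)]
        simp [rep2]
      · have hp : List.isPrefixOf ['-','-'] (c1 :: c2 :: t) = false := by
          simp [List.isPrefixOf]; exact fun h1 h2 => hdd ⟨h1.symm, h2.symm⟩
        simp only [hp, Bool.false_eq_true, if_neg, not_false_iff]
        rw [ih _ _ (by simp at h ⊢; omega)]
        rw [rep2_cons_cons _ _ _ hdd]
        simp

theorem replace_dd (s : List Char) :
    PySem.Chars.replace s ['-','-'] ['-'] = rep2 s := by
  rw [PySem.Chars.replace]
  simp only [List.isEmpty_cons, Bool.false_eq_true, if_neg, not_false_iff]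
  exact go_dd s.length s [] (le_refl _)

theorem hasDD_iff_infix (s : List Char) : hasDD s = true ↔ ['-','-'] <:+: s := by
  induction s with
  | nil => simp [hasDD]
  | cons c t ih =>
    rw [List.infix_cons_iff]
    constructor
    · intro h
      simp only [hasDD, Bool.or_eq_true, Bool.and_eq_true, decide_eq_true_eq] at h
      rcases h with ⟨rfl, hh⟩ | h
      · left
        rcases t with _ | ⟨c2, t'⟩
        · simp at hh
        · simp only [List.head?_cons, Option.some.injEq] at hh
          subst hh
          exact ⟨t', rfl⟩
      · exact Or.inr (ih.mp h)
    · intro h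
      simp only [hasDD, Bool.or_eq_true, Bool.and_eq_true, decide_eq_true_eq]
      rcases h with ⟨t', ht⟩ | h
      · injection ht with h1 h2; subst h1 h2; exact Or.inl ⟨rfl, rfl⟩
      · exact Or.inr (ih.mpr h)

theorem isIn_dd_eq_hasDD (s : List Char) : PySem.Chars.isIn ['-','-'] s = hasDD s := by
  by_cases h : hasDD s = true
  · rw [h, (PySem.Chars.isIn_iff_infix _ _).mpr ((hasDD_iff_infix s).mp h)]
  · rw [Bool.not_eq_true] at h
    rw [h, PySem.Chars.isIn_eq_false_iff]
    intro hin
    exact absurd ((hasDD_iff_infix s).mpr hin) (by simp [h])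

theorem rep2_length_le (s : List Char) : (rep2 s).length ≤ s.length := by
  induction s using rep2.induct with
  | case1 t ih => simp only [rep2, List.length_cons]; omega
  | case2 c t hno ih =>
    rcases t with _ | ⟨c2, t'⟩
    · have : rep2 [c] = [c] := by by_cases hc : c = '-' <;> simp [hc, rep2]
      simp [this]
    · have hne : ¬(c = '-' ∧ c2 = '-') := by
        intro ⟨h1, h2⟩; exact hno t' h1 (by rw [h2])
      rw [rep2_cons_cons _ _ _ hne]
      simp only [List.length_cons] at ih ⊢
      omega
  | case3 => simp [rep2]

theorem rep2_length_lt (s : List Char) (h : hasDD s = true) :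
    (rep2 s).length < s.length := by
  induction s using rep2.induct with
  | case1 t =>
    have := rep2_length_le t
    simp only [rep2, List.length_cons]
    omega
  | case2 c t hno ih =>
    rcases t with _ | ⟨c2, t'⟩
    · simp [hasDD] at h
    · have hne : ¬(c = '-' ∧ c2 = '-') := by
        intro ⟨h1, h2⟩; exact hno t' h1 (by rw [h2])
      rw [rep2_cons_cons _ _ _ hne]
      simp only [List.length_cons]
      have hdd' : hasDD (c2 :: t') = true := by
        simp only [hasDD, Bool.or_eq_true, Bool.and_eq_true, decide_eq_true_eq] at h ⊢
        rcases h with ⟨h1, h2⟩ | h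
        · exact absurd ⟨h1, by simpa using h2⟩ hne
        · exact h
      have := ih hdd'
      simp only [List.length_cons] at this ⊢
      omega
  | case3 => simp [hasDD] at h

-- the `while "--" in t: t = t.replace("--", "-")` loop
def pvCollapse (s : List Char) : List Char :=
  if PySem.Chars.isIn ['-','-'] s = true then pvCollapse (PySem.Chars.replace s ['-','-'] ['-']) else s
termination_by s.length
decreasing_by
  rename_i h
  rw [replace_dd]
  exact rep2_length_lt s (by rw [← isIn_dd_eq_hasDD]; exact h)

def normalize_test_name (t : Option String) : String :=
  -- t = (t or "").strip().lower()  (on the char list; PySem.Chars.* are the exact Str semantics)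
  let s := PySem.Chars.lower (PySem.Chars.strip (t.getD "").toList)
  -- if not t: return ""
  if s = [] then ""
  else
    -- t.replace(" ", "-").replace("_", "-") then t.replace("&", "and")
    let s2 := PySem.Chars.replace (PySem.Chars.replace s [' '] ['-']) ['_'] ['-']
    let s3 := PySem.Chars.replace s2 ['&'] ['a','n','d']
    -- while "--" in t: t = t.replace("--", "-")
    let s4 := pvCollapse s3
    -- _TEST_NORMALIZATION_ALIASES.get(t, t)
    let r := String.ofList s4
    PySem.Dict.getD pvAliases r r

-- ===== PORT B =====
-- loop body of B's single pass: state = (out so far, last emitted char was '-')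
def pvStep (st : List Char × Bool) (ch : Char) : List Char × Bool :=
  if ch = ' ' ∨ ch = '_' ∨ ch = '-' then
    if st.2 then st else (st.1 ++ ['-'], true)
  else if ch = '&' then (st.1 ++ ['a','n','d'], false)
  else (st.1 ++ [ch], false)

def normalize_test_name_alt (t : Option String) : String :=
  let s := PySem.Chars.lower (PySem.Chars.strip (t.getD "").toList)
  if s = [] then ""
  else
    let r := String.ofList (s.foldl pvStep ([], false)).1
    PySem.Dict.getD pvAliases r r

-- ===== PRECONDITION & SPEC =====
def Spec_normalize_test_name (t : Option String) (out : String) : Prop := out = normalize_test_name_alt t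
instance (t : Option String) (out : String) : Decidable (Spec_normalize_test_name t out) := by unfold Spec_normalize_test_name; infer_instance

-- ===== CLAIM (what is proved, stated in full; the proofs are below) =====
def Claim_equal_normalize_test_name : Prop := ∀ (t : Option String), Dom_normalize_test_name t → Spec_normalize_test_name t (normalize_test_name t)

-- ===== LEMMAS AND PROOFS =====

-- the collapsed form: runs of '-' squeezed to one; the flag says "previous char was '-'"
def pvSq : Bool → List Char → List Char
  | _, [] => []
  | p, c :: t => if c = '-' then (if p then pvSq true t else '-' :: pvSq true t) else c :: pvSq false t

-- per-character expansion performed by A's three single-char replaces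
def pvE (c : Char) : List Char :=
  if c = ' ' then ['-'] else if c = '_' then ['-'] else if c = '&' then ['a','n','d'] else [c]

theorem sq_rep2 (s : List Char) (p : Bool) : pvSq p (rep2 s) = pvSq p s := by
  induction s using rep2.induct generalizing p with
  | case1 t ih =>
    simp only [rep2, pvSq]
    cases p <;> simp [ih]
  | case2 c t hno ih =>
    rcases t with _ | ⟨c2, t'⟩
    · simp [rep2]
    · have hne : ¬(c = '-' ∧ c2 = '-') := by
        intro ⟨h1, h2⟩; exact hno t' h1 (by rw [h2])
      rw [rep2_cons_cons _ _ _ hne]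
      by_cases hc : c = '-' <;> simp [pvSq, hc, ih]
  | case3 => rfl

theorem sq_id (s : List Char) (p : Bool) (h : hasDD s = false)
    (hp : p = true → s.head? ≠ some '-') : pvSq p s = s := by
  induction s generalizing p with
  | nil => rfl
  | cons c t ih =>
    simp only [hasDD, Bool.or_eq_false_iff, Bool.and_eq_false_iff] at h
    by_cases hc : c = '-'
    · subst hc
      have hpf : p = false := by
        cases p
        · rfl
        · exact absurd (by simp : (('-' :: t).head? = some '-')) (hp rfl)
      subst hpf
      have hth : t.head? ≠ some '-' := by
        rcases h.1 with h1 | h1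
        · simp at h1
        · simpa using h1
      have := ih true h.2 (fun _ => hth)
      simp [pvSq, this]
    · have := ih false h.2 (by simp)
      simp [pvSq, hc, this]

theorem pvCollapse_eq_sq (s : List Char) : pvCollapse s = pvSq false s := by
  induction s using pvCollapse.induct with
  | case1 s hin ih =>
    rw [pvCollapse, if_pos hin, ih, replace_dd, sq_rep2]
  | case2 s hin =>
    rw [pvCollapse, if_neg hin]
    refine (sq_id s false ?_ (by simp)).symm
    rw [← isIn_dd_eq_hasDD]
    simpa using hin

theorem foldl_pvStep (s : List Char) (out : List Char) (p : Bool) :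
    (List.foldl pvStep (out, p) s).1 = out ++ pvSq p (s.flatMap pvE) := by
  induction s generalizing out p with
  | nil => simp [pvSq]
  | cons c t ih =>
    rw [List.foldl_cons]
    by_cases hsep : c = ' ' ∨ c = '_' ∨ c = '-'
    · have hE : pvE c = ['-'] := by
        rcases hsep with rfl | rfl | rfl <;> simp [pvE]
      cases p with
      | true =>
        have hstep : pvStep (out, true) c = (out, true) := by
          simp [pvStep, hsep]
        rw [hstep, ih]
        simp [hE, pvSq]
      | false =>
        have hstep : pvStep (out, false) c = (out ++ ['-'], true) := by
          simp [pvStep, hsep]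
        rw [hstep, ih]
        simp [hE, pvSq]
    · push Not at hsep
      obtain ⟨hsp, hus, hhy⟩ := hsep
      by_cases hamp : c = '&'
      · subst hamp
        have hstep : pvStep (out, p) '&' = (out ++ ['a','n','d'], false) := by
          simp [pvStep]
        rw [hstep, ih]
        simp [pvE, pvSq]
      · have hstep : pvStep (out, p) c = (out ++ [c], false) := by
          simp [pvStep, hsp, hus, hhy, hamp]
        rw [hstep, ih]
        simp [pvE, pvSq, hsp, hus, hhy, hamp]

theorem go_single (a : Char) (ns : List Char) (fuel : Nat) (s acc : List Char) (h : s.length ≤ fuel) :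
    PySem.Chars.replace.go [a] ns fuel s acc
      = acc.reverse ++ s.flatMap (fun c => if c = a then ns else [c]) := by
  induction fuel generalizing s acc with
  | zero =>
    have : s = [] := List.length_eq_zero_iff.mp (Nat.le_zero.mp h)
    subst this; simp [PySem.Chars.replace.go]
  | succ n ih =>
    match s, h with
    | [], _ => simp [PySem.Chars.replace.go]
    | c :: t, h =>
      rw [PySem.Chars.replace.go]
      by_cases hc : c = a
      · subst hc
        have hp : List.isPrefixOf [c] (c :: t) = true := by simp [List.isPrefixOf]
        simp only [hp, if_pos]
        rw [show List.drop ([c] : List Char).length (c :: t) = t from rfl]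
        rw [ih _ _ (by simpa using h)]
        simp
      · have hp : List.isPrefixOf [a] (c :: t) = false := by
          simp [List.isPrefixOf]; exact fun h' => absurd h'.symm hc
        simp only [hp, Bool.false_eq_true, if_neg, not_false_iff]
        rw [ih _ _ (by simp at h ⊢; omega)]
        simp [hc]

theorem replace_single (s : List Char) (a : Char) (ns : List Char) :
    PySem.Chars.replace s [a] ns = s.flatMap (fun c => if c = a then ns else [c]) := by
  rw [PySem.Chars.replace]
  simp only [List.isEmpty_cons, Bool.false_eq_true, if_neg, not_false_iff]
  exact go_single a ns s.length s [] (le_refl _)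

theorem expand_eq (s : List Char) :
    PySem.Chars.replace (PySem.Chars.replace (PySem.Chars.replace s [' '] ['-']) ['_'] ['-']) ['&'] ['a','n','d']
      = s.flatMap pvE := by
  rw [replace_single, replace_single, replace_single, List.flatMap_assoc, List.flatMap_assoc]
  refine List.flatMap_congr (fun c _ => ?_)
  by_cases h1 : c = ' '
  · subst h1; simp [pvE]
  · by_cases h2 : c = '_'
    · subst h2; simp [pvE]
    · by_cases h3 : c = '&'
      · subst h3; simp [pvE, h1]
      · simp [pvE, h1, h2, h3]

-- ===== VERDICT (by name: the statement is the Claim_ definition above) =====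
theorem normalize_test_name_spec : Claim_equal_normalize_test_name := by
  intro t _
  unfold Spec_normalize_test_name
  simp only [normalize_test_name, normalize_test_name_alt]
  by_cases hs : PySem.Chars.lower (PySem.Chars.strip (t.getD "").toList) = []
  · simp [hs]
  · simp only [hs, if_neg, not_false_iff]
    rw [pvCollapse_eq_sq, expand_eq, foldl_pvStep]
    simp
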